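-- pv_equiv track=rewrite | github.com/mohammad-mallaee/CS | DS/HomeWorks/2/q_3.py | get_data_structure
-- ===== SOURCE A (Python) =====
-- def get_data_structure(list):
--     list_size = len(list)
--     Matrix = [[0] * list_size for _ in range(list_size)]
--     for i in range(0, len(list)):
--         for j in range(i + 1):
--             min_ij = get_min(list, j, i)
--             Matrix[j][i] = min_ij
--             Matrix[i][j] = min_ij
--     return Matrix
--
-- def get_min(list, start, end):
--     min = list[start]
--     for k in range(start, end + 1):
--         min = list[k] if list[k] < min else min
--     return min
-- ===== SOURCE B (Python) =====
-- def get_data_structure(list):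
--     # Running-minimum sweep per row: O(n^2) instead of recomputing each range min.
--     n = len(list)
--     rows = []
--     for k in range(n):
--         left = []
--         m = list[k]
--         for j in range(k, -1, -1):
--             m = list[j] if list[j] < m else m
--             left.append(m)
--         left.reverse()
--         m = list[k]
--         right = []
--         for j in range(k + 1, n):
--             m = list[j] if list[j] < m else m
--             right.append(m)
--         rows.append(left + right)
--     return rows
-- ===== Notes on version B (the rewrite author's own statement) =====
-- stated objective: faster
-- what changed: Replaces the O(n^3) recompute-the-range-minimum-per-pair scheme by a per-row running-minimum sweep (left and right from the diagonal), building each row directly in O(n).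
import Mathlib
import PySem

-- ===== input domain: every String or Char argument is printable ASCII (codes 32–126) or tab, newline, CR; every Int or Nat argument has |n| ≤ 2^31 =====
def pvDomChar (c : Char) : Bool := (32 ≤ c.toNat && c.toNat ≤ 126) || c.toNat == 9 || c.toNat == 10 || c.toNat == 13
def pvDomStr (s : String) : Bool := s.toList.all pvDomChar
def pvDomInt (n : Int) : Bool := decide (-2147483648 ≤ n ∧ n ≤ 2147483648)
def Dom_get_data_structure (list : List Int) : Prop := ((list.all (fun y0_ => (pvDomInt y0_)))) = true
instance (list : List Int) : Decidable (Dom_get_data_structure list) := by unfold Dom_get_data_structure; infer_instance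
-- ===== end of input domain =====

-- B replaces A's per-pair range-minimum recomputation by per-row running-minimum sweeps; objective: faster.

-- ===== PORT A =====
-- get_min: indices are always in range where A calls it (0 ≤ start ≤ end < len), so getD is exact there.
def get_min (l : List Int) (s e : Nat) : Int :=
  (List.range' s (e + 1 - s)).foldl
    (fun m k => if l.getD k 0 < m then l.getD k 0 else m) (l.getD s 0)

-- Matrix[r][c] = v on a list-of-lists matrix (both indices in range wherever A uses it).
def pySet2 (M : List (List Int)) (r c : Nat) (v : Int) : List (List Int) :=
  M.set r ((M.getD r []).set c v)

def get_data_structure (list : List Int) : List (List Int) :=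
  let n := list.length
  let M0 := List.replicate n (List.replicate n 0)
  (List.range n).foldl (fun M i =>
    (List.range (i + 1)).foldl (fun M j =>
      let m := get_min list j i
      pySet2 (pySet2 M j i m) i j m) M) M0

-- ===== PORT B =====
-- left sweep of Source B: j from k down to 0, running minimum, appending
def leftGo (l : List Int) (m : Int) (j : Nat) (acc : List Int) : List Int :=
  let x := l.getD j 0
  let m' := if x < m then x else m
  match j with
  | 0 => acc ++ [m']
  | Nat.succ j' => leftGo l m' j' (acc ++ [m'])

def get_data_structure_alt (list : List Int) : List (List Int) :=
  let n := list.length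
  (List.range n).map (fun k =>
    let left := (leftGo list (list.getD k 0) k []).reverse
    let right := ((List.range' (k + 1) (n - (k + 1))).foldl
      (fun (p : Int × List Int) j =>
        let x := list.getD j 0
        let m' := if x < p.1 then x else p.1
        (m', p.2 ++ [m'])) (list.getD k 0, ([] : List Int))).2
    left ++ right)

-- ===== PRECONDITION & SPEC =====
def Spec_get_data_structure (list : List Int) (out : List (List Int)) : Prop := out = get_data_structure_alt list
instance (list : List Int) (out : List (List Int)) : Decidable (Spec_get_data_structure list out) := by unfold Spec_get_data_structure; infer_instance

-- ===== CLAIM (what is proved, stated in full; the proofs are below) =====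
def Claim_equal_get_data_structure : Prop := ∀ (list : List Int), Dom_get_data_structure list → Spec_get_data_structure list (get_data_structure list)

-- ===== LEMMAS AND PROOFS =====

-- min of list[a..b] (inclusive, 0 ≤ a ≤ b), the common reference value
def mseg (l : List Int) (a b : Nat) : Int :=
  (List.range' (a + 1) (b - a)).foldl (fun m k => min m (l.getD k 0)) (l.getD a 0)

def mkMat (n : Nat) (e : Nat → Nat → Int) : List (List Int) :=
  (List.range n).map (fun r => (List.range n).map (e r))

theorem pymin (l : List Int) (k : Nat) (m : Int) :
    (if l.getD k 0 < m then l.getD k 0 else m) = min m (l.getD k 0) := by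
  simp only [min_def]
  split_ifs <;> omega

theorem step_eq_min (l : List Int) :
    (fun (m : Int) (k : Nat) => if l.getD k 0 < m then l.getD k 0 else m)
      = (fun (m : Int) (k : Nat) => min m (l.getD k 0)) := by
  funext m k
  exact pymin l k m

theorem foldl_min_init (l : List Int) (xs : List Nat) (a b : Int) :
    xs.foldl (fun m k => min m (l.getD k 0)) (min a b)
      = min a (xs.foldl (fun m k => min m (l.getD k 0)) b) := by
  induction xs generalizing b with
  | nil => simp
  | cons x xs ih =>
      simp only [List.foldl_cons, min_assoc]
      exact ih _

theorem mseg_self (l : List Int) (a : Nat) : mseg l a a = l.getD a 0 := by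
  simp [mseg]

theorem mseg_succ (l : List Int) {a b : Nat} (h : a ≤ b) :
    mseg l a (b + 1) = min (mseg l a b) (l.getD (b + 1) 0) := by
  have hr : b + 1 - a = (b - a) + 1 := by omega
  have hc : List.range' (a + 1) ((b - a) + 1) 1
      = List.range' (a + 1) (b - a) 1 ++ [(a + 1) + 1 * (b - a)] := List.range'_concat
  simp [mseg, hr, hc]
  rw [show a + 1 + (b - a) = b + 1 from by omega]

theorem mseg_cons (l : List Int) {a b : Nat} (h : a < b) :
    mseg l a b = min (l.getD a 0) (mseg l (a + 1) b) := by
  have hr : b - a = (b - (a + 1)) + 1 := by omega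
  have hc : List.range' (a + 1) ((b - (a + 1)) + 1) 1
      = (a + 1) :: List.range' (a + 2) (b - (a + 1)) 1 := by
    simp [List.range'_succ]
  simp only [mseg, hr, hc, List.foldl_cons]
  exact foldl_min_init l _ _ _

theorem mseg_le_right (l : List Int) {a b : Nat} (h : a ≤ b) :
    mseg l a b ≤ l.getD b 0 := by
  rcases Nat.eq_or_lt_of_le h with h' | h'
  · subst h'; simp [mseg_self]
  · obtain ⟨c, rfl⟩ : ∃ c, b = c + 1 := ⟨b - 1, by omega⟩
    rw [mseg_succ l (by omega : a ≤ c)]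
    exact min_le_right _ _

theorem get_min_eq (l : List Int) {s e : Nat} (h : s ≤ e) :
    get_min l s e = mseg l s e := by
  have hr : e + 1 - s = (e - s) + 1 := by omega
  have hc : List.range' s ((e - s) + 1) 1 = s :: List.range' (s + 1) (e - s) 1 := by
    simp [List.range'_succ]
  unfold get_min mseg
  rw [step_eq_min, hr, hc, List.foldl_cons, min_self]

-- matrix update lemmas
theorem set_range_map {α : Type} (n : Nat) (f : Nat → α) (r0 : Nat) (v : α) :
    ((List.range n).map f).set r0 v
      = (List.range n).map (fun r => if r = r0 then v else f r) := by
  apply List.ext_getElem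
  · simp
  · intro i h1 h2
    simp only [List.getElem_set, List.getElem_map, List.getElem_range] at *
    split_ifs with hA hB hB
    · rfl
    · omega
    · omega
    · rfl

theorem getD_range_map (n : Nat) (f : Nat → List Int) (r0 : Nat) (h : r0 < n) :
    ((List.range n).map f).getD r0 [] = f r0 := by
  simp [List.getD_eq_getElem?_getD, List.getElem?_map, List.getElem?_range h]

theorem pySet2_mkMat (n : Nat) (e : Nat → Nat → Int) (r0 c0 : Nat) (v : Int)
    (hr : r0 < n) (hc : c0 < n) :
    pySet2 (mkMat n e) r0 c0 v
      = mkMat n (fun r c => if r = r0 ∧ c = c0 then v else e r c) := by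
  unfold pySet2 mkMat
  rw [getD_range_map n _ r0 hr, set_range_map n _ c0 v, set_range_map n _ r0 _]
  apply List.map_congr_left
  intro r _
  by_cases h : r = r0
  · subst h
    rw [if_pos rfl]
    apply List.map_congr_left
    intro c _
    by_cases h' : c = c0 <;> simp [h']
  · simp only [if_neg h]
    apply List.map_congr_left
    intro c _
    simp [h]

theorem mkMat_congr {n : Nat} {e e' : Nat → Nat → Int}
    (h : ∀ r < n, ∀ c < n, e r c = e' r c) : mkMat n e = mkMat n e' := by
  unfold mkMat
  apply List.map_congr_left
  intro r hr
  apply List.map_congr_left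
  intro c hc
  exact h r (List.mem_range.mp hr) c (List.mem_range.mp hc)

theorem pySet2_pair (n : Nat) (e : Nat → Nat → Int) (i p : Nat) (v : Int)
    (hi : i < n) (hp : p < n) :
    pySet2 (pySet2 (mkMat n e) p i v) i p v
      = mkMat n (fun r c => if (r = i ∧ c = p) ∨ (r = p ∧ c = i) then v else e r c) := by
  rw [pySet2_mkMat n e p i v hp hi, pySet2_mkMat n _ i p v hi hp]
  apply mkMat_congr
  intro r _ c _
  split_ifs <;> tauto

-- A: inner loop invariant
theorem inner_inv (l : List Int) (n : Nat) (e : Nat → Nat → Int)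
    {i : Nat} (hi : i < n) :
    ∀ p, p ≤ i + 1 →
    (List.range p).foldl (fun M j =>
        let m := get_min l j i
        pySet2 (pySet2 M j i m) i j m) (mkMat n e)
      = mkMat n (fun r c =>
          if (c = i ∧ r < p) ∨ (r = i ∧ c < p)
          then mseg l (min r c) (max r c) else e r c) := by
  intro p
  induction p with
  | zero =>
      intro _
      simp only [List.range_zero, List.foldl_nil]
      exact mkMat_congr (by intro r _ c _; simp)
  | succ p ih =>
      intro hp
      rw [List.range_succ, List.foldl_append, ih (by omega)]
      have hgm : get_min l p i = mseg l p i := get_min_eq l (by omega)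
      have key := pySet2_pair n
        (fun r c => if (c = i ∧ r < p) ∨ (r = i ∧ c < p)
          then mseg l (min r c) (max r c) else e r c)
        i p (get_min l p i) hi (by omega)
      refine Eq.trans key (mkMat_congr ?_)
      intro r hr c hc
      beta_reduce
      rw [hgm]
      by_cases hA : (r = i ∧ c = p) ∨ (r = p ∧ c = i)
      · rw [if_pos hA]
        have hcond : (c = i ∧ r < p + 1) ∨ (r = i ∧ c < p + 1) := by
          rcases hA with ⟨h, h'⟩ | ⟨h, h'⟩
          · exact Or.inr ⟨h, by omega⟩
          · exact Or.inl ⟨h', by omega⟩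
        rw [if_pos hcond]
        rcases hA with ⟨h, h'⟩ | ⟨h, h'⟩ <;>
          rw [show min r c = p from by rw [Nat.min_def]; split_ifs <;> omega,
            show max r c = i from by rw [Nat.max_def]; split_ifs <;> omega]
      · rw [if_neg hA]
        have hiff : ((c = i ∧ r < p) ∨ (r = i ∧ c < p))
            ↔ ((c = i ∧ r < p + 1) ∨ (r = i ∧ c < p + 1)) := by
          constructor
          · rintro (⟨h, h'⟩ | ⟨h, h'⟩)
            · exact Or.inl ⟨h, by omega⟩
            · exact Or.inr ⟨h, by omega⟩
          · rintro (⟨h, h'⟩ | ⟨h, h'⟩)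
            · refine Or.inl ⟨h, ?_⟩
              rcases Nat.lt_succ_iff_lt_or_eq.mp h' with h'' | h''
              · exact h''
              · exact absurd (Or.inr ⟨h'', h⟩) hA
            · refine Or.inr ⟨h, ?_⟩
              rcases Nat.lt_succ_iff_lt_or_eq.mp h' with h'' | h''
              · exact h''
              · exact absurd (Or.inl ⟨h, h''⟩) hA
        rw [if_congr hiff rfl rfl]

-- A: outer loop invariant
theorem outer_inv (l : List Int) (n : Nat) :
    ∀ m, m ≤ n →
    (List.range m).foldl (fun M i =>
        (List.range (i + 1)).foldl (fun M j =>
          let mv := get_min l j i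
          pySet2 (pySet2 M j i mv) i j mv) M)
      (List.replicate n (List.replicate n 0))
      = mkMat n (fun r c => if r < m ∧ c < m then mseg l (min r c) (max r c) else 0) := by
  intro m
  induction m with
  | zero =>
      intro _
      simp only [List.range_zero, List.foldl_nil]
      unfold mkMat
      simp [List.map_const']
  | succ m ih =>
      intro hm
      rw [List.range_succ, List.foldl_append, ih (by omega)]
      have step := inner_inv l n
        (fun r c => if r < m ∧ c < m then mseg l (min r c) (max r c) else 0)
        (show m < n by omega) (m + 1) (by omega)
      refine Eq.trans step (mkMat_congr ?_)
      intro r hr c hc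
      beta_reduce
      by_cases hA : (c = m ∧ r < m + 1) ∨ (r = m ∧ c < m + 1)
      · rw [if_pos hA, if_pos (show r < m + 1 ∧ c < m + 1 from by
          rcases hA with ⟨h, h'⟩ | ⟨h, h'⟩ <;> omega)]
      · rw [if_neg hA]
        by_cases hB : r < m ∧ c < m
        · rw [if_pos hB, if_pos (show r < m + 1 ∧ c < m + 1 from by omega)]
        · rw [if_neg hB, if_neg (show ¬(r < m + 1 ∧ c < m + 1) from ?_)]
          rintro ⟨h, h'⟩
          rcases Nat.lt_succ_iff_lt_or_eq.mp h with hr' | hr'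
          · rcases Nat.lt_succ_iff_lt_or_eq.mp h' with hc' | hc'
            · exact hB ⟨hr', hc'⟩
            · exact hA (Or.inl ⟨hc', by omega⟩)
          · exact hA (Or.inr ⟨hr', by omega⟩)

-- B: left sweep characterization
theorem leftGo_eq (l : List Int) :
    ∀ j m acc, leftGo l m j acc
      = acc ++ (List.range (j + 1)).reverse.map (fun t => min m (mseg l t j)) := by
  intro j
  induction j with
  | zero =>
      intro m acc
      rw [show leftGo l m 0 acc
            = acc ++ [if l.getD 0 0 < m then l.getD 0 0 else m] from rfl, pymin]
      simp [mseg_self]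
  | succ j ih =>
      intro m acc
      rw [show leftGo l m (j + 1) acc
            = leftGo l (if l.getD (j + 1) 0 < m then l.getD (j + 1) 0 else m) j
                (acc ++ [if l.getD (j + 1) 0 < m then l.getD (j + 1) 0 else m]) from rfl,
        ih, pymin]
      have hrev : (List.range (j + 1 + 1)).reverse
          = (j + 1) :: ((List.range (j + 1)).reverse) := by
        rw [List.range_succ]; simp
      rw [hrev, List.map_cons, List.append_assoc]
      congr 1
      simp only [List.singleton_append, mseg_self]
      congr 1
      apply List.map_congr_left
      intro t ht
      have ht' : t < j + 1 := List.mem_range.mp (List.mem_reverse.mp ht)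
      rw [mseg_succ l (show t ≤ j by omega), min_assoc,
        min_comm (l.getD (j + 1) 0) (mseg l t j)]

-- B: right sweep characterization
theorem rightGo_eq (l : List Int) :
    ∀ q s m acc, ((List.range' s q).foldl
        (fun (p : Int × List Int) j =>
          let x := l.getD j 0
          let m' := if x < p.1 then x else p.1
          (m', p.2 ++ [m'])) (m, acc)).2
      = acc ++ (List.range' s q).map (fun j => min m (mseg l s j)) := by
  intro q
  induction q with
  | zero => intro s m acc; simp
  | succ q ih =>
      intro s m acc
      rw [List.range'_succ, List.foldl_cons]
      show ((List.range' (s + 1) q).foldl _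
          (if l.getD s 0 < m then l.getD s 0 else m,
            acc ++ [if l.getD s 0 < m then l.getD s 0 else m])).2 = _
      rw [ih (s + 1), pymin, List.map_cons]
      simp only [mseg_self, List.append_assoc, List.singleton_append]
      congr 1
      congr 1
      apply List.map_congr_left
      intro j hj
      obtain ⟨t, ht, rfl⟩ := List.mem_range'.mp hj
      rw [mseg_cons l (show s < s + 1 + 1 * t by omega), min_assoc]

-- the common closed form
theorem a_eq (l : List Int) :
    get_data_structure l = mkMat l.length (fun r c => mseg l (min r c) (max r c)) := by
  rw [show get_data_structure l
      = (List.range l.length).foldl (fun M i =>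
          (List.range (i + 1)).foldl (fun M j =>
            let mv := get_min l j i
            pySet2 (pySet2 M j i mv) i j mv) M)
        (List.replicate l.length (List.replicate l.length 0)) from rfl]
  rw [outer_inv l l.length l.length le_rfl]
  apply mkMat_congr
  intro r hr c hc
  rw [if_pos ⟨hr, hc⟩]

theorem b_eq (l : List Int) :
    get_data_structure_alt l = mkMat l.length (fun r c => mseg l (min r c) (max r c)) := by
  rw [show get_data_structure_alt l
      = (List.range l.length).map (fun k =>
          (leftGo l (l.getD k 0) k []).reverse ++
          ((List.range' (k + 1) (l.length - (k + 1))).foldl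
            (fun (p : Int × List Int) j =>
              let x := l.getD j 0
              let m' := if x < p.1 then x else p.1
              (m', p.2 ++ [m'])) (l.getD k 0, ([] : List Int))).2) from rfl]
  unfold mkMat
  apply List.map_congr_left
  intro k hk
  have hkn : k < l.length := List.mem_range.mp hk
  rw [leftGo_eq l k (l.getD k 0) [], rightGo_eq l (l.length - (k + 1)) (k + 1) (l.getD k 0) []]
  simp only [List.nil_append]
  rw [← List.map_reverse, List.reverse_reverse]
  have hsplit : List.range l.length
      = List.range (k + 1) ++ List.range' (k + 1) (l.length - (k + 1)) := by
    rw [List.range_eq_range', List.range_eq_range',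
      show List.range' (k + 1) (l.length - (k + 1)) = List.range' (0 + 1 * (k + 1)) (l.length - (k + 1)) from by norm_num,
      List.range'_append, show k + 1 + (l.length - (k + 1)) = l.length from by omega]
  rw [hsplit, List.map_append]
  congr 1
  · apply List.map_congr_left
    intro t ht
    have ht' : t < k + 1 := List.mem_range.mp ht
    rw [min_eq_right (mseg_le_right l (show t ≤ k by omega)),
      show min k t = t from by rw [Nat.min_def]; split_ifs <;> omega,
      show max k t = k from by rw [Nat.max_def]; split_ifs <;> omega]
  · apply List.map_congr_left
    intro j hj
    obtain ⟨t, ht, rfl⟩ := List.mem_range'.mp hj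
    rw [← mseg_cons l (show k < k + 1 + 1 * t by omega),
      show min k (k + 1 + 1 * t) = k from by rw [Nat.min_def]; split_ifs <;> omega,
      show max k (k + 1 + 1 * t) = k + 1 + 1 * t from by rw [Nat.max_def]; split_ifs <;> omega]

-- ===== VERDICT (by name: the statement is the Claim_ definition above) =====
theorem get_data_structure_spec : Claim_equal_get_data_structure := by
  intro list _
  unfold Spec_get_data_structure
  rw [a_eq, b_eq]
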